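-- pv_equiv track=rewrite | github.com/bzhan/holpy | util/poly.py | collect_pairs
-- ===== SOURCE A (Python) =====
-- def collect_pairs(ps):
--     """Reduce a list of pairs by collecting into groups according to
--     first components, and adding the second component for each group.
--
--     It is assumed that the first components are hashable.
--
--     e.g. [("x", 1), ("y", 2), ("x", 3)] => [("x", 4), ("y", 2)]
--
--     """
--     res = {}
--     for v, c in ps:
--         if v in res:
--             res[v] += c
--         else:
--             res[v] = c
--     return tuple(sorted((k, v) for k, v in res.items() if v != 0))
-- ===== SOURCE B (Python) =====
-- def collect_pairs(ps):
--     """Reduce a list of pairs by collecting into groups according to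
--     first components, and adding the second component for each group.
--
--     Sort-then-scan: stable-sort the pairs by first component, then one
--     linear pass merges each equal-key run, emitting (key, total) when the
--     total is non-zero; the output is already in sorted order.
--     """
--     qs = sorted(ps, key=lambda p: p[0])
--     if not qs:
--         return ()
--     res = []
--     cur_k, cur_s = qs[0]
--     for k, v in qs[1:]:
--         if k == cur_k:
--             cur_s += v
--         else:
--             if cur_s != 0:
--                 res.append((cur_k, cur_s))
--             cur_k, cur_s = k, v
--     if cur_s != 0:
--         res.append((cur_k, cur_s))
--     return tuple(res)
-- ===== Notes on version B (the rewrite author's own statement) =====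
-- stated objective: alternative
-- what changed: Replaces A's dict accumulation followed by a final sort of the items with a stable sort of the input pairs by key followed by a single linear pass that merges each equal-key run and emits non-zero totals already in order.
import Mathlib
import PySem

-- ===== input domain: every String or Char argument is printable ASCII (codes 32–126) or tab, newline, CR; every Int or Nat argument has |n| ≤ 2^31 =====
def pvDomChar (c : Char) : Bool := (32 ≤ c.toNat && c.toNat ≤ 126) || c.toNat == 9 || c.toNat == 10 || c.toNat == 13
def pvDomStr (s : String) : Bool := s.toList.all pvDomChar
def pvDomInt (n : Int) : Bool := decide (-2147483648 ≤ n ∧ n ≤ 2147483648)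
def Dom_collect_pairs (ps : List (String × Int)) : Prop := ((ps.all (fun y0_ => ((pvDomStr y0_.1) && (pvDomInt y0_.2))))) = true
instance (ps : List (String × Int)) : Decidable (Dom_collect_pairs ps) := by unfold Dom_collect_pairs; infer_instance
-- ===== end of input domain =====

-- B replaces A's dict accumulation + final sort of items by a stable sort of the
-- input pairs by key followed by one linear merging pass (same cost class; 'alternative').


-- ===== PORT A =====
-- res = {}; for v, c in ps: res[v] += c / res[v] = c; return tuple(sorted((k,v) for k,v in res.items() if v != 0))
-- Python's tuple comparison inside sorted(...) is the lexicographic order, ported as the key 'toLex kv'.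
def collect_pairs (ps : List (String × Int)) : List (String × Int) :=
  let res : PySem.Dict String Int :=
    ps.foldl (fun d p =>
      if d.contains p.1 then d.insert p.1 (d.getD p.1 0 + p.2)
      else d.insert p.1 p.2) PySem.Dict.empty
  PySem.List.sorted (res.items.filter (fun kv => kv.2 != 0)) (fun kv => toLex kv)

-- ===== PORT B =====
-- the linear merging pass over the tail of the sorted list: state = (current key, running sum)
def pvGroupRun : String → Int → List (String × Int) → List (String × Int)
  | k, acc, [] => if acc != 0 then [(k, acc)] else []
  | k, acc, (k', v) :: rest =>
      if k' == k then pvGroupRun k (acc + v) rest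
      else (if acc != 0 then [(k, acc)] else []) ++ pvGroupRun k' v rest

def collect_pairs_alt (ps : List (String × Int)) : List (String × Int) :=
  match PySem.List.sorted ps (fun p => p.1) with
  | [] => []
  | (k, v) :: rest => pvGroupRun k v rest

-- ===== PRECONDITION & SPEC =====
def Spec_collect_pairs (ps : List (String × Int)) (out : List (String × Int)) : Prop := out = collect_pairs_alt ps
instance (ps : List (String × Int)) (out : List (String × Int)) : Decidable (Spec_collect_pairs ps out) := by unfold Spec_collect_pairs; infer_instance

-- ===== CLAIM (what is proved, stated in full; the proofs are below) =====
def Claim_equal_collect_pairs : Prop := ∀ (ps : List (String × Int)), Dom_collect_pairs ps → Spec_collect_pairs ps (collect_pairs ps)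

-- ===== LEMMAS AND PROOFS =====

-- the total of the values attached to key k in l
def pvSum (l : List (String × Int)) (k : String) : Int :=
  ((l.filter (fun p => p.1 == k)).map (·.2)).sum

theorem pvSum_nil (k : String) : pvSum [] k = 0 := rfl

theorem pvSum_cons (p : String × Int) (l : List (String × Int)) (k : String) :
    pvSum (p :: l) k = if p.1 = k then p.2 + pvSum l k else pvSum l k := by
  simp only [pvSum, List.filter_cons]
  split_ifs with h <;> simp_all

theorem pvSum_eq_zero_of_forall_ne (l : List (String × Int)) (k : String)
    (h : ∀ p ∈ l, p.1 ≠ k) : pvSum l k = 0 := by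
  induction l with
  | nil => rfl
  | cons p l ih =>
      rw [pvSum_cons, if_neg (h p (by simp))]
      exact ih (fun q hq => h q (by simp [hq]))

theorem pvSum_perm (l l' : List (String × Int)) (h : l.Perm l') (k : String) :
    pvSum l k = pvSum l' k := by
  unfold pvSum
  exact ((h.filter _).map _).sum_eq

-- ---- A side ----

theorem pvFold_body_eq :
    (fun (d : PySem.Dict String Int) (p : String × Int) =>
      if d.contains p.1 then d.insert p.1 (d.getD p.1 0 + p.2) else d.insert p.1 p.2)
    = (fun d p => d.insert p.1 (if d.contains p.1 then d.getD p.1 0 + p.2 else p.2)) := by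
  funext d p
  split_ifs <;> rfl

theorem pvFold_getD (l : List (String × Int)) (d : PySem.Dict String Int) (k : String) :
    (l.foldl (fun d p => d.insert p.1 (if d.contains p.1 then d.getD p.1 0 + p.2 else p.2)) d).getD k 0
      = d.getD k 0 + pvSum l k := by
  induction l generalizing d with
  | nil => simp [pvSum_nil]
  | cons p l ih =>
      have hv : (if d.contains p.1 then d.getD p.1 0 + p.2 else p.2) = d.getD p.1 0 + p.2 := by
        split_ifs with h
        · rfl
        · rw [PySem.Dict.getD_of_not_contains d 0 (by simpa using h)]; omega
      rw [List.foldl_cons, ih, PySem.Dict.getD_insert, pvSum_cons, hv]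
      by_cases h1 : k = p.1
      · rw [if_pos h1, if_pos h1.symm, ← h1]; omega
      · rw [if_neg h1, if_neg (fun hh => h1 hh.symm)]

theorem pvFold_getD_empty (l : List (String × Int)) (k : String) :
    (l.foldl (fun d p => d.insert p.1 (if d.contains p.1 then d.getD p.1 0 + p.2 else p.2))
      (PySem.Dict.empty : PySem.Dict String Int)).getD k 0 = pvSum l k := by
  rw [pvFold_getD]
  have h0 : (PySem.Dict.empty : PySem.Dict String Int).getD k 0 = 0 := rfl
  rw [h0, zero_add]

theorem pvFold_keys (l : List (String × Int)) :
    (l.foldl (fun d p => d.insert p.1 (if d.contains p.1 then d.getD p.1 0 + p.2 else p.2))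
      (PySem.Dict.empty : PySem.Dict String Int)).keys
      = PySem.Set.ofList (l.map (·.1)) := by
  rw [PySem.Dict.keys_foldl_insert_key l (·.1)
    (fun d p => if d.contains p.1 then d.getD p.1 0 + p.2 else p.2) PySem.Dict.empty]
  rfl

-- membership characterisation of A's filtered items list
theorem pvLA_mem (ps : List (String × Int)) (j : String) (w : Int) :
    ((j, w) ∈ (((ps.foldl (fun d p =>
        if d.contains p.1 then d.insert p.1 (d.getD p.1 0 + p.2) else d.insert p.1 p.2)
        (PySem.Dict.empty : PySem.Dict String Int)).items).filter (fun kv => kv.2 != 0)))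
      ↔ (j ∈ ps.map (·.1) ∧ w = pvSum ps j ∧ w ≠ 0) := by
  rw [pvFold_body_eq]
  have hnd : (ps.foldl (fun d p => d.insert p.1 (if d.contains p.1 then d.getD p.1 0 + p.2 else p.2))
      (PySem.Dict.empty : PySem.Dict String Int)).keys.Nodup := by
    rw [pvFold_keys]; exact PySem.Set.nodup_ofList _
  rw [PySem.Dict.items_eq_map_keys _ hnd 0, List.mem_filter, List.mem_map]
  constructor
  · rintro ⟨⟨k, hk, hkj⟩, hw⟩
    rw [pvFold_keys] at hk
    simp only [Prod.mk.injEq] at hkj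
    obtain ⟨h1, h2⟩ := hkj
    subst h1
    rw [pvFold_getD_empty] at h2
    exact ⟨(PySem.Set.mem_ofList _ _).1 hk, h2.symm, by simpa [← h2] using hw⟩
  · rintro ⟨hj, hw, hw0⟩
    refine ⟨⟨j, ?_, ?_⟩, ?_⟩
    · rw [pvFold_keys]; exact (PySem.Set.mem_ofList _ _).2 hj
    · rw [pvFold_getD_empty, Prod.mk.injEq]; exact ⟨rfl, hw.symm⟩
    · simpa using hw0

theorem pvLA_nodup (ps : List (String × Int)) :
    (((ps.foldl (fun d p =>
        if d.contains p.1 then d.insert p.1 (d.getD p.1 0 + p.2) else d.insert p.1 p.2)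
        (PySem.Dict.empty : PySem.Dict String Int)).items).filter (fun kv => kv.2 != 0)).Nodup := by
  rw [pvFold_body_eq]
  have hnd : (ps.foldl (fun d p => d.insert p.1 (if d.contains p.1 then d.getD p.1 0 + p.2 else p.2))
      (PySem.Dict.empty : PySem.Dict String Int)).keys.Nodup := by
    rw [pvFold_keys]; exact PySem.Set.nodup_ofList _
  refine List.Nodup.filter _ ?_
  rw [PySem.Dict.items_eq_map_keys _ hnd 0]
  refine hnd.map ?_
  intro a b h
  simpa using congrArg Prod.fst h

-- ---- B side ----

theorem pvGroupRun_mem (l : List (String × Int)) (k : String) (acc : Int)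
    (hge : ∀ p ∈ l, k ≤ p.1) (hpw : l.Pairwise (fun a b => a.1 ≤ b.1)) (j : String) (w : Int) :
    ((j, w) ∈ pvGroupRun k acc l ↔
      (w ≠ 0 ∧ ((j = k ∧ w = acc + pvSum l k) ∨ (j ≠ k ∧ j ∈ l.map (·.1) ∧ w = pvSum l j)))) := by
  induction l generalizing k acc with
  | nil =>
      rw [pvGroupRun]
      split_ifs with ha
      · replace ha : acc ≠ 0 := by simpa using ha
        simp only [List.mem_singleton, Prod.mk.injEq, pvSum_nil, List.map_nil,
          List.not_mem_nil, false_and, and_false, or_false, add_zero]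
        constructor
        · rintro ⟨rfl, rfl⟩; exact ⟨ha, rfl, rfl⟩
        · rintro ⟨_, rfl, rfl⟩; exact ⟨rfl, rfl⟩
      · replace ha : acc = 0 := by simpa using ha
        simp only [List.not_mem_nil, false_iff, pvSum_nil, List.map_nil, add_zero, ha,
          false_and, and_false, or_false]
        rintro ⟨hw, _, rfl⟩
        exact hw rfl
  | cons q rest ih =>
      obtain ⟨k', v⟩ := q
      have hk'ge : k ≤ k' := hge (k', v) (by simp)
      have hrge : ∀ p ∈ rest, k' ≤ p.1 := fun p hp => (List.pairwise_cons.1 hpw).1 p hp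
      have hrpw : rest.Pairwise (fun a b => a.1 ≤ b.1) := (List.pairwise_cons.1 hpw).2
      rw [List.map_cons]
      by_cases hk : k' = k
      · subst hk
        rw [pvGroupRun, if_pos (by simp)]
        rw [ih k' (acc + v) hrge hrpw]
        constructor
        · rintro ⟨hw, (⟨h1, h2⟩ | ⟨h1, h2, h3⟩)⟩
          · refine ⟨hw, Or.inl ⟨h1, ?_⟩⟩
            rw [pvSum_cons, if_pos rfl]; omega
          · refine ⟨hw, Or.inr ⟨h1, List.mem_cons_of_mem _ h2, ?_⟩⟩
            rw [pvSum_cons, if_neg (fun hh => h1 hh.symm)]; exact h3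
        · rintro ⟨hw, (⟨h1, h2⟩ | ⟨h1, h2, h3⟩)⟩
          · rw [pvSum_cons, if_pos rfl] at h2
            exact ⟨hw, Or.inl ⟨h1, by omega⟩⟩
          · rcases List.mem_cons.1 h2 with h | h
            · exact absurd h h1
            · rw [pvSum_cons, if_neg (fun hh => h1 hh.symm)] at h3
              exact ⟨hw, Or.inr ⟨h1, h, h3⟩⟩
      · have hklt : k < k' := lt_of_le_of_ne hk'ge (fun h => hk h.symm)
        rw [pvGroupRun, if_neg (by simpa using hk)]
        rw [List.mem_append, ih k' v hrge hrpw]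
        have hrestgt : ∀ p ∈ rest, k < p.1 := fun p hp => lt_of_lt_of_le hklt (hrge p hp)
        have hSk : pvSum ((k', v) :: rest) k = 0 := by
          refine pvSum_eq_zero_of_forall_ne _ _ ?_
          intro p hp
          rcases List.mem_cons.1 hp with h | h
          · rw [h]; exact hk
          · exact ne_of_gt (hrestgt p h)
        constructor
        · rintro (hpre | ⟨hw, (⟨h1, h2⟩ | ⟨h1, h2, h3⟩)⟩)
          · have hae : acc ≠ 0 ∧ (j, w) = (k, acc) := by
              by_cases ha : acc = 0
              · rw [if_neg (by simpa using ha)] at hpre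
                exact absurd hpre (List.not_mem_nil)
              · rw [if_pos (by simpa using ha)] at hpre
                exact ⟨ha, List.mem_singleton.1 hpre⟩
            obtain ⟨ha, he⟩ := hae
            simp only [Prod.mk.injEq] at he
            obtain ⟨rfl, rfl⟩ := he
            exact ⟨ha, Or.inl ⟨rfl, by rw [hSk]; omega⟩⟩
          · subst h1
            refine ⟨hw, Or.inr ⟨ne_of_gt hklt, List.mem_cons_self, ?_⟩⟩
            rw [pvSum_cons, if_pos rfl]; exact h2
          · have hjgt : k < j := by
              obtain ⟨p, hp, hpj⟩ := List.mem_map.1 h2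
              exact hpj ▸ hrestgt p hp
            refine ⟨hw, Or.inr ⟨ne_of_gt hjgt, List.mem_cons_of_mem _ h2, ?_⟩⟩
            rw [pvSum_cons, if_neg (fun hh => h1 hh.symm)]; exact h3
        · rintro ⟨hw, (⟨h1, h2⟩ | ⟨h1, h2, h3⟩)⟩
          · subst h1
            rw [hSk] at h2
            left
            rw [if_pos (by simpa [h2] using hw)]
            rw [List.mem_singleton, Prod.mk.injEq]
            exact ⟨rfl, by omega⟩
          · right
            rcases List.mem_cons.1 h2 with h | h
            · subst h
              rw [pvSum_cons, if_pos rfl] at h3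
              exact ⟨hw, Or.inl ⟨rfl, h3⟩⟩
            · by_cases hjj : j = k'
              · subst hjj
                rw [pvSum_cons, if_pos rfl] at h3
                exact ⟨hw, Or.inl ⟨rfl, h3⟩⟩
              · rw [pvSum_cons, if_neg (fun hh => hjj hh.symm)] at h3
                exact ⟨hw, Or.inr ⟨hjj, h, h3⟩⟩

theorem pvGroupRun_sorted (l : List (String × Int)) (k : String) (acc : Int)
    (hge : ∀ p ∈ l, k ≤ p.1) (hpw : l.Pairwise (fun a b => a.1 ≤ b.1)) :
    (pvGroupRun k acc l).Pairwise (fun a b => a.1 < b.1) ∧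
      ∀ q ∈ pvGroupRun k acc l, k ≤ q.1 := by
  induction l generalizing k acc with
  | nil =>
      rw [pvGroupRun]
      split_ifs
      · exact ⟨List.pairwise_singleton _ _, by rintro q hq; rw [List.mem_singleton.1 hq]⟩
      · exact ⟨List.Pairwise.nil, by rintro q hq; exact absurd hq (List.not_mem_nil)⟩
  | cons p rest ih =>
      obtain ⟨k', v⟩ := p
      have hk'ge : k ≤ k' := hge (k', v) (by simp)
      have hrge : ∀ q ∈ rest, k' ≤ q.1 := fun q hq => (List.pairwise_cons.1 hpw).1 q hq
      have hrpw : rest.Pairwise (fun a b => a.1 ≤ b.1) := (List.pairwise_cons.1 hpw).2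
      by_cases hk : k' = k
      · subst hk
        rw [pvGroupRun, if_pos (by simp)]
        exact ih k' (acc + v) hrge hrpw
      · have hklt : k < k' := lt_of_le_of_ne hk'ge (fun h => hk h.symm)
        rw [pvGroupRun, if_neg (by simpa using hk)]
        obtain ⟨ihpw, ihge⟩ := ih k' v hrge hrpw
        have hpre : ∀ a ∈ (if acc != 0 then [(k, acc)] else []), a = (k, acc) := by
          intro a ha
          split_ifs at ha
          · exact List.mem_singleton.1 ha
          · exact absurd ha (List.not_mem_nil)
        constructor
        · rw [List.pairwise_append]
          refine ⟨?_, ihpw, ?_⟩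
          · split_ifs
            · exact List.pairwise_singleton _ _
            · exact List.Pairwise.nil
          · intro a ha b hb
            rw [hpre a ha]
            exact lt_of_lt_of_le hklt (ihge b hb)
        · intro q hq
          rcases List.mem_append.1 hq with h | h
          · rw [hpre q h]
          · exact le_of_lt (lt_of_lt_of_le hklt (ihge q h))

-- ===== VERDICT (by name: the statement is the Claim_ definition above) =====
set_option maxHeartbeats 1000000 in
theorem collect_pairs_spec : Claim_equal_collect_pairs := by
  intro ps _
  unfold Spec_collect_pairs
  have hperm : (PySem.List.sorted ps (fun p => p.1)).Perm ps := PySem.List.sorted_perm ps _ false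
  have hpw : (PySem.List.sorted ps (fun p => p.1)).Pairwise (fun a b => a.1 ≤ b.1) :=
    PySem.List.sorted_pairwise ps (fun p => p.1)
  cases hq : PySem.List.sorted ps (fun p => p.1) with
  | nil =>
      have hps : ps = [] := (hq ▸ hperm).nil_eq.symm
      subst hps
      rfl
  | cons q rest =>
      obtain ⟨k, v⟩ := q
      rw [hq] at hperm hpw
      have hB : collect_pairs_alt ps = pvGroupRun k v rest := by
        unfold collect_pairs_alt
        rw [hq]
      rw [hB]
      show PySem.List.sorted (((ps.foldl (fun d p =>
          if d.contains p.1 then d.insert p.1 (d.getD p.1 0 + p.2) else d.insert p.1 p.2)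
          (PySem.Dict.empty : PySem.Dict String Int)).items).filter (fun kv => kv.2 != 0))
          (fun kv => toLex kv) = pvGroupRun k v rest
      have hrge : ∀ p ∈ rest, k ≤ p.1 := fun p hp => (List.pairwise_cons.1 hpw).1 p hp
      have hrpw : rest.Pairwise (fun a b => a.1 ≤ b.1) := (List.pairwise_cons.1 hpw).2
      -- B's keys are strictly increasing, hence lexicographically strictly increasing
      have hys_pw : (pvGroupRun k v rest).Pairwise
          (fun a b => (fun kv : String × Int => toLex kv) a < (fun kv : String × Int => toLex kv) b) := by
        refine ((pvGroupRun_sorted rest k v hrge hrpw).1).imp ?_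
        intro a b h
        exact Prod.Lex.toLex_lt_toLex.2 (Or.inl h)
      have hys_nodup : (pvGroupRun k v rest).Nodup := by
        refine List.Pairwise.imp ?_ (pvGroupRun_sorted rest k v hrge hrpw).1
        intro a b h hab
        rw [hab] at h
        exact lt_irrefl _ h
      refine PySem.List.sorted_eq_of_perm_of_pairwise_lt _ _ _ ?_ hys_pw
      -- the permutation, via membership on both Nodup lists
      rw [List.perm_ext_iff_of_nodup hys_nodup (pvLA_nodup ps)]
      rintro ⟨j, w⟩
      rw [pvLA_mem ps j w, pvGroupRun_mem rest k v hrge hrpw j w]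
      have hmap : j ∈ ps.map (·.1) ↔ j ∈ ((k, v) :: rest).map (·.1) := (hperm.map (·.1)).symm.mem_iff
      have hsum : pvSum ps j = pvSum ((k, v) :: rest) j := pvSum_perm _ _ hperm.symm j
      rw [List.map_cons] at hmap
      constructor
      · rintro ⟨hw, (⟨h1, h2⟩ | ⟨h1, h2, h3⟩)⟩
        · subst h1
          refine ⟨hmap.2 List.mem_cons_self, ?_, hw⟩
          rw [hsum, pvSum_cons, if_pos rfl]
          exact h2
        · refine ⟨hmap.2 (List.mem_cons_of_mem _ h2), ?_, hw⟩
          rw [hsum, pvSum_cons, if_neg (fun hh => h1 hh.symm)]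
          exact h3
      · rintro ⟨hmem, hws, hw0⟩
        refine ⟨hw0, ?_⟩
        rw [hsum] at hws
        by_cases hjk : j = k
        · subst hjk
          rw [pvSum_cons, if_pos rfl] at hws
          exact Or.inl ⟨rfl, hws⟩
        · rcases List.mem_cons.1 (hmap.1 hmem) with h | h
          · exact absurd h hjk
          · rw [pvSum_cons, if_neg (fun hh => hjk hh.symm)] at hws
            exact Or.inr ⟨hjk, h, hws⟩
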